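-- pv_equiv track=rewrite | github.com/rf-peixoto/Studies | Code/Python/hash_blobs.py | render_identicon_png
-- ===== SOURCE A (Python) =====
-- from typing import List, Tuple, Optional
--
-- def _hash_bytes_from_hex(hexstr: str) -> bytes:
--     try:
--         return bytes.fromhex(hexstr.strip())
--     except Exception:
--         raise ValueError("Input is not valid hex.")
--
-- class BitStream:
--     def __init__(self, data: bytes):
--         self.bits = []
--         for byte in data:
--             for i in range(8):
--                 self.bits.append((byte >> (7 - i)) & 1)
--         self.idx = 0
--
--     def get_bit(self) -> int:
--         b = self.bits[self.idx % len(self.bits)]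
--         self.idx += 1
--         return b
--
--     def get_bits(self, n: int) -> int:
--         v = 0
--         for _ in range(n):
--             v = (v << 1) | self.get_bit()
--         return v
--
-- def render_identicon_png(hexhash: str,
--                          size_px: int = 1024,
--                          grid: int = 5,
--                          primary_rgb: Tuple[int,int,int] = (58,123,213),
--                          bg_rgb: Tuple[int,int,int] = (10,10,10),
--                          accent_rgb: Optional[Tuple[int,int,int]] = None) -> List[List[Tuple[int,int,int,int]]]:
--     """
--     2D front-orthographic identicon (classic symmetry), no 3D shading.
--     """
--     b = _hash_bytes_from_hex(hexhash)
--     bs = BitStream(b)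
--     cols_left = (grid + 1)//2
--     left = [[bs.get_bit() for _ in range(grid)] for _ in range(cols_left)]
--     occ = [[0]*grid for _ in range(grid)]
--     for x in range(cols_left):
--         for y in range(grid):
--             bit = left[x][y]
--             occ[x][y] = bit
--             occ[grid-1-x][y] = bit
--
--     # Optional: small accent cross if enough 1s; deterministic toggle
--     use_accent = bool(accent_rgb) and (sum(sum(r) for r in occ) % 3 == 1)
--
--     # Raster at cell-level then upscale to pixels
--     cell_px = max(1, size_px // grid)
--     w = h = cell_px * grid
--     pixels = [[(bg_rgb[0], bg_rgb[1], bg_rgb[2], 255) for _ in range(w)] for _ in range(h)]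
--
--     for y in range(grid):
--         for x in range(grid):
--             if occ[x][y]:
--                 for yy in range(y*cell_px, (y+1)*cell_px):
--                     row = pixels[yy]
--                     for xx in range(x*cell_px, (x+1)*cell_px):
--                         row[xx] = (primary_rgb[0], primary_rgb[1], primary_rgb[2], 255)
--
--     if use_accent:
--         mid = grid//2
--         for y in range(grid):
--             for yy in range(y*cell_px, (y+1)*cell_px):
--                 row = pixels[yy]
--                 for xx in range(mid*cell_px, (mid+1)*cell_px):
--                     row[xx] = (accent_rgb[0], accent_rgb[1], accent_rgb[2], 255)
--         for x in range(grid):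
--             for yy in range(mid*cell_px, (mid+1)*cell_px):
--                 row = pixels[yy]
--                 for xx in range(x*cell_px, (x+1)*cell_px):
--                     row[xx] = (accent_rgb[0], accent_rgb[1], accent_rgb[2], 255)
--
--     # If requested size doesn't divide evenly, we can pad/crop later; for now we clip to exact w=h.
--     return pixels
-- ===== SOURCE B (Python) =====
-- from typing import List, Tuple, Optional
--
-- def render_identicon_png(hexhash: str,
--                          size_px: int = 1024,
--                          grid: int = 5,
--                          primary_rgb: Tuple[int,int,int] = (58,123,213),
--                          bg_rgb: Tuple[int,int,int] = (10,10,10),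
--                          accent_rgb: Optional[Tuple[int,int,int]] = None) -> List[List[Tuple[int,int,int,int]]]:
--     try:
--         data = bytes.fromhex(hexhash.strip())
--     except Exception:
--         raise ValueError("Input is not valid hex.")
--     bits = [(byte >> (7 - i)) & 1 for byte in data for i in range(8)]
--
--     # Symmetric cell occupancy, computed directly: cell (x, y) mirrors column
--     # min(x, grid-1-x) of the left half, whose bit sits at a fixed stream offset.
--     def cell_bit(x: int, y: int) -> int:
--         col = x if 2 * x < grid else grid - 1 - x
--         return bits[(col * grid + y) % len(bits)]
--
--     total = sum(cell_bit(x, y) for x in range(grid) for y in range(grid))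
--     use_accent = bool(accent_rgb) and total % 3 == 1
--
--     cell_px = max(1, size_px // grid)
--     mid = grid // 2
--     bg4 = (bg_rgb[0], bg_rgb[1], bg_rgb[2], 255)
--     pr4 = (primary_rgb[0], primary_rgb[1], primary_rgb[2], 255)
--
--     def color(x: int, y: int) -> Tuple[int,int,int,int]:
--         if use_accent and (x == mid or y == mid):
--             return (accent_rgb[0], accent_rgb[1], accent_rgb[2], 255)
--         return pr4 if cell_bit(x, y) else bg4
--
--     # Resolve each cell's final colour once, then upscale cell rows to pixel rows.
--     pixels: List[List[Tuple[int,int,int,int]]] = []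
--     for y in range(grid):
--         cell_row: List[Tuple[int,int,int,int]] = []
--         for x in range(grid):
--             cell_row += [color(x, y)] * cell_px
--         pixels += [cell_row] * cell_px
--     return pixels
-- ===== Notes on version B (the rewrite author's own statement) =====
-- stated objective: alternative
-- what changed: B resolves each cell's final colour once (accent over primary over background, occupancy read directly from the bit stream at its fixed offset via the mirrored column index) and builds the pixel grid by repeating each cell colour and each cell row, instead of A's paint-background-then-overwrite-primary-then-overwrite-accent per-pixel mutation passes over a pre-built pixel matrix.
import Mathlib
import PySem

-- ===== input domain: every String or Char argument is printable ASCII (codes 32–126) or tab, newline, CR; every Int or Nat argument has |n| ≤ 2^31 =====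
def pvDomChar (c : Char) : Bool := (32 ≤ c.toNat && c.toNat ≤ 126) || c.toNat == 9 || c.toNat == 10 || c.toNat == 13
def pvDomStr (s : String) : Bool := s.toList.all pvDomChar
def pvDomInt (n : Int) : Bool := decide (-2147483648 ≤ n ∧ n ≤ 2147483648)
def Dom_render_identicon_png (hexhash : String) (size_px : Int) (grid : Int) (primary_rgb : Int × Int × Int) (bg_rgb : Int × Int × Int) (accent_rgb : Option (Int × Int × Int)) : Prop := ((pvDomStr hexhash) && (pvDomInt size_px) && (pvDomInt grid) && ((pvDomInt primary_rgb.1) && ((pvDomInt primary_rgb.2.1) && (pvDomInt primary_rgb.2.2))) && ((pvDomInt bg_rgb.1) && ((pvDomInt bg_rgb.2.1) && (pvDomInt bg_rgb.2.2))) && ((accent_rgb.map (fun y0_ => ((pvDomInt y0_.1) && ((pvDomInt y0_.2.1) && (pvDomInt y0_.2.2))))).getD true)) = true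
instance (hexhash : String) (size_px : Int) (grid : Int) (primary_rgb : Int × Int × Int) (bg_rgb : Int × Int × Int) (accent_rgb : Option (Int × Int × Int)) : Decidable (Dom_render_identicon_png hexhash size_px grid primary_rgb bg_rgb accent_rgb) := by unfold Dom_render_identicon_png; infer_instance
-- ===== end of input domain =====

-- B resolves every cell's colour once and upscales it by list repetition instead of A's
-- bg/primary/accent per-pixel overwrite passes over a mutable pixel matrix (return value only).

-- ===== PORT A =====
-- shared helper: bytes.fromhex(s) on the ASCII domain (pairs of hex digits, ASCII whitespace
-- skipped between pairs, never inside a pair; none = ValueError). Hand-written, exact there.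
def pvHexVal? (c : Char) : Option Int :=
  if '0' ≤ c ∧ c ≤ '9' then some ((c.toNat : Int) - 48)
  else if 'a' ≤ c ∧ c ≤ 'f' then some ((c.toNat : Int) - 87)
  else if 'A' ≤ c ∧ c ≤ 'F' then some ((c.toNat : Int) - 55)
  else none

def pvIsHexWS (c : Char) : Bool :=
  c.toNat == 32 || c.toNat == 9 || c.toNat == 10 || c.toNat == 11 || c.toNat == 12 || c.toNat == 13

def pvFromHex? : List Char → Option (List Int)
  | [] => some []
  | [c] => if pvIsHexWS c then some [] else none
  | c :: d :: rest =>
    if pvIsHexWS c then pvFromHex? (d :: rest)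
    else
      match pvHexVal? c, pvHexVal? d with
      | some h, some l => (pvFromHex? rest).map (fun bs => (16 * h + l) :: bs)
      | _, _ => none

-- _hash_bytes_from_hex: bytes.fromhex(hexstr.strip()); none = ValueError (excluded by Pre_)
def pvHexBytes? (s : String) : Option (List Int) :=
  pvFromHex? (PySem.Chars.strip s.toList)

-- BitStream.__init__: self.bits (each byte unpacked MSB first; (byte >> (7-i)) & 1)
def pvBitsOf (data : List Int) : List Int :=
  data.flatMap (fun byte =>
    (PySem.List.pyRange 0 8 1).map (fun i => PySem.Int.band (byte >>> (7 - i).toNat) 1))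

-- left = [[bs.get_bit() for _ in range(grid)] for _ in range(cols_left)] with the idx state;
-- get_bit reads bits[idx % len(bits)] (exact when bits ≠ []; Python raises ZeroDivisionError
-- on empty bits, excluded by Pre_).
def pvA_left (bits : List Int) (cols_left grid : Int) : List (List Int) × Int :=
  (PySem.List.pyRange 0 cols_left 1).foldl
    (fun acc _ =>
      let inner := (PySem.List.pyRange 0 grid 1).foldl
        (fun (a : List Int × Int) _ =>
          (a.1 ++ [PySem.List.pyGetD bits (PySem.Int.mod a.2 (bits.length : Int)) 0], a.2 + 1))
        (([] : List Int), acc.2)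
      (acc.1 ++ [inner.1], inner.2))
    (([] : List (List Int)), 0)

-- the occ double loop (occ[x][y] = bit; occ[grid-1-x][y] = bit); in-range list mutation via pySetD
def pvA_occ (left : List (List Int)) (cols_left grid : Int) : List (List Int) :=
  (PySem.List.pyRange 0 cols_left 1).foldl
    (fun occ x =>
      (PySem.List.pyRange 0 grid 1).foldl
        (fun occ y =>
          let bit := PySem.List.pyGetD (PySem.List.pyGetD left x []) y 0
          let occ1 := PySem.List.pySetD occ x (PySem.List.pySetD (PySem.List.pyGetD occ x []) y bit)
          PySem.List.pySetD occ1 (grid - 1 - x)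
            (PySem.List.pySetD (PySem.List.pyGetD occ1 (grid - 1 - x) []) y bit))
        occ)
    ((PySem.List.pyRange 0 grid 1).map (fun _ => PySem.List.pyRepeat [(0 : Int)] grid))

-- the two nested pixel loops painting one cell (rows yy, columns xx)
def pvA_paintCell (px : List (List (Int × Int × Int × Int))) (x y c : Int)
    (v : Int × Int × Int × Int) : List (List (Int × Int × Int × Int)) :=
  (PySem.List.pyRange (y * c) ((y + 1) * c) 1).foldl
    (fun px yy =>
      PySem.List.pySetD px yy
        ((PySem.List.pyRange (x * c) ((x + 1) * c) 1).foldl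
          (fun row xx => PySem.List.pySetD row xx v)
          (PySem.List.pyGetD px yy [])))
    px

def render_identicon_png (hexhash : String) (size_px : Int) (grid : Int) (primary_rgb : Int × Int × Int) (bg_rgb : Int × Int × Int) (accent_rgb : Option (Int × Int × Int)) : List (List (Int × Int × Int × Int)) :=
  match pvHexBytes? hexhash with
  | none => []  -- Python raises ValueError here; excluded by Pre_
  | some data =>
    let bits := pvBitsOf data
    let cols_left := PySem.Int.floordiv (grid + 1) 2
    let left := (pvA_left bits cols_left grid).1
    let occ := pvA_occ left cols_left grid
    let use_accent := accent_rgb.isSome && (PySem.Int.mod ((occ.map List.sum).sum) 3 == 1)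
    let c := max 1 (PySem.Int.floordiv size_px grid)  -- grid = 0 (ZeroDivisionError) excluded by Pre_
    let w := c * grid
    let pixels0 := (PySem.List.pyRange 0 w 1).map (fun _ =>
      (PySem.List.pyRange 0 w 1).map (fun _ => (bg_rgb.1, bg_rgb.2.1, bg_rgb.2.2, (255 : Int))))
    let pr4 := (primary_rgb.1, primary_rgb.2.1, primary_rgb.2.2, (255 : Int))
    let pixels1 := (PySem.List.pyRange 0 grid 1).foldl
      (fun px y => (PySem.List.pyRange 0 grid 1).foldl
        (fun px x =>
          if PySem.List.pyGetD (PySem.List.pyGetD occ x []) y 0 ≠ 0 then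
            pvA_paintCell px x y c pr4
          else px) px) pixels0
    if use_accent then
      let mid := PySem.Int.floordiv grid 2
      let ac := accent_rgb.getD (0, 0, 0)
      let ac4 := (ac.1, ac.2.1, ac.2.2, (255 : Int))
      let px2 := (PySem.List.pyRange 0 grid 1).foldl (fun px y => pvA_paintCell px mid y c ac4) pixels1
      (PySem.List.pyRange 0 grid 1).foldl (fun px x => pvA_paintCell px x mid c ac4) px2
    else pixels1

-- ===== PORT B =====
-- cell_bit(x, y): the mirrored column's bit read directly from the stream
def pvB_cellBit (bits : List Int) (grid x y : Int) : Int :=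
  let col := if 2 * x < grid then x else grid - 1 - x
  PySem.List.pyGetD bits (PySem.Int.mod (col * grid + y) (bits.length : Int)) 0

-- color(x, y): the cell's final colour, resolved once
def pvB_color (bits : List Int) (grid mid : Int) (use_accent : Bool)
    (pr4 bg4 ac4 : Int × Int × Int × Int) (x y : Int) : Int × Int × Int × Int :=
  if use_accent && (x == mid || y == mid) then ac4
  else if pvB_cellBit bits grid x y ≠ 0 then pr4 else bg4

def render_identicon_png_alt (hexhash : String) (size_px : Int) (grid : Int) (primary_rgb : Int × Int × Int) (bg_rgb : Int × Int × Int) (accent_rgb : Option (Int × Int × Int)) : List (List (Int × Int × Int × Int)) :=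
  match pvHexBytes? hexhash with
  | none => []  -- Python raises ValueError here; excluded by Pre_
  | some data =>
    let bits := pvBitsOf data
    let total := (PySem.List.pyRange 0 grid 1).foldl
      (fun s x => (PySem.List.pyRange 0 grid 1).foldl
        (fun s y => s + pvB_cellBit bits grid x y) s) 0
    let use_accent := accent_rgb.isSome && (PySem.Int.mod total 3 == 1)
    let c := max 1 (PySem.Int.floordiv size_px grid)
    let mid := PySem.Int.floordiv grid 2
    let bg4 := (bg_rgb.1, bg_rgb.2.1, bg_rgb.2.2, (255 : Int))
    let pr4 := (primary_rgb.1, primary_rgb.2.1, primary_rgb.2.2, (255 : Int))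
    let ac := accent_rgb.getD (0, 0, 0)
    let ac4 := (ac.1, ac.2.1, ac.2.2, (255 : Int))
    (PySem.List.pyRange 0 grid 1).foldl
      (fun px y =>
        let cell_row := (PySem.List.pyRange 0 grid 1).foldl
          (fun r x => r ++ PySem.List.pyRepeat [pvB_color bits grid mid use_accent pr4 bg4 ac4 x y] c) []
        px ++ PySem.List.pyRepeat [cell_row] c)
      []

-- ===== PRECONDITION & SPEC =====
-- Pre_ excludes exactly the inputs on which A raises: invalid hex (ValueError: a non-hex
-- non-whitespace character, or a whitespace-delimited digit run of odd length), grid == 0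
-- (ZeroDivisionError in size_px // grid), and grid >= 1 with an empty byte string
-- (ZeroDivisionError in BitStream.get_bit's idx % len(self.bits)).
def Pre_render_identicon_png (hexhash : String) (size_px : Int) (grid : Int) (primary_rgb : Int × Int × Int) (bg_rgb : Int × Int × Int) (accent_rgb : Option (Int × Int × Int)) : Prop :=
  ((PySem.Chars.strip hexhash.toList).all (fun c => pvIsHexWS c || (pvHexVal? c).isSome)) = true ∧
  (((PySem.Chars.strip hexhash.toList).splitOnP pvIsHexWS).all (fun r => r.length % 2 == 0)) = true ∧
  grid ≠ 0 ∧
  (1 ≤ grid → ((PySem.Chars.strip hexhash.toList).any (fun c => !(pvIsHexWS c))) = true)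
instance (hexhash : String) (size_px : Int) (grid : Int) (primary_rgb : Int × Int × Int) (bg_rgb : Int × Int × Int) (accent_rgb : Option (Int × Int × Int)) : Decidable (Pre_render_identicon_png hexhash size_px grid primary_rgb bg_rgb accent_rgb) := by unfold Pre_render_identicon_png; infer_instance

def pvWitness_render_identicon_png : String × Int × Int × (Int × Int × Int) × (Int × Int × Int) × (Option (Int × Int × Int)) :=
  ("aa", 4, 2, (1, 2, 3), (4, 5, 6), none)

def Spec_render_identicon_png (hexhash : String) (size_px : Int) (grid : Int) (primary_rgb : Int × Int × Int) (bg_rgb : Int × Int × Int) (accent_rgb : Option (Int × Int × Int)) (out : List (List (Int × Int × Int × Int))) : Prop := out = render_identicon_png_alt hexhash size_px grid primary_rgb bg_rgb accent_rgb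
instance (hexhash : String) (size_px : Int) (grid : Int) (primary_rgb : Int × Int × Int) (bg_rgb : Int × Int × Int) (accent_rgb : Option (Int × Int × Int)) (out : List (List (Int × Int × Int × Int))) : Decidable (Spec_render_identicon_png hexhash size_px grid primary_rgb bg_rgb accent_rgb out) := by unfold Spec_render_identicon_png; infer_instance

-- ===== CLAIM (what is proved, stated in full; the proofs are below) =====
def Claim_equal_render_identicon_png : Prop := ∀ (hexhash : String) (size_px : Int) (grid : Int) (primary_rgb : Int × Int × Int) (bg_rgb : Int × Int × Int) (accent_rgb : Option (Int × Int × Int)), Dom_render_identicon_png hexhash size_px grid primary_rgb bg_rgb accent_rgb → Pre_render_identicon_png hexhash size_px grid primary_rgb bg_rgb accent_rgb → Spec_render_identicon_png hexhash size_px grid primary_rgb bg_rgb accent_rgb (render_identicon_png hexhash size_px grid primary_rgb bg_rgb accent_rgb)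

-- ===== LEMMAS AND PROOFS =====

-- bit of the stream at (wrapped) offset j
def pvBitAt (bits : List Int) (j : Int) : Int :=
  PySem.List.pyGetD bits (PySem.Int.mod j (bits.length : Int)) 0

-- the column a cell in column i mirrors
def pvColOf (g i : Int) : Int := if 2 * i < g then i else g - 1 - i

-- square matrix in map-normal form
def pvMat {α : Type} (b : Int) (F : Int → Int → α) : List (List α) :=
  (PySem.List.pyRange 0 b 1).map (fun i => (PySem.List.pyRange 0 b 1).map (fun j => F i j))

theorem pvCellBit_eq (bits : List Int) (g x y : Int) :
    pvB_cellBit bits g x y = pvBitAt bits (pvColOf g x * g + y) := rfl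

theorem pvMap_ext {α : Type} (b : Int) (f g : Int → α)
    (h : ∀ i, 0 ≤ i → i < b → f i = g i) :
    (PySem.List.pyRange 0 b 1).map f = (PySem.List.pyRange 0 b 1).map g := by
  apply List.map_congr_left
  intro i hi
  rw [PySem.List.mem_pyRange_one] at hi
  exact h i hi.1 hi.2

theorem pvMat_ext {α : Type} (b : Int) (F G : Int → Int → α)
    (h : ∀ i j, 0 ≤ i → i < b → 0 ≤ j → j < b → F i j = G i j) :
    pvMat b F = pvMat b G := by
  unfold pvMat
  apply pvMap_ext
  intro i hi0 hib
  exact pvMap_ext _ _ _ (fun j hj0 hjb => h i j hi0 hib hj0 hjb)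

theorem pvGet_map {α : Type} (b : Int) (f : Int → α) (i : Int) (d : α)
    (h0 : 0 ≤ i) (hb : i < b) :
    PySem.List.pyGetD ((PySem.List.pyRange 0 b 1).map f) i d = f i :=
  PySem.List.pyGetD_map_pyRange_of_nonneg f b i d h0 hb

theorem pvSet_map {α : Type} (b : Int) (f : Int → α) (i : Int) (v : α)
    (h0 : 0 ≤ i) (_hb : i < b) :
    PySem.List.pySetD ((PySem.List.pyRange 0 b 1).map f) i v
      = (PySem.List.pyRange 0 b 1).map (fun i' => if i' = i then v else f i') := by
  rw [PySem.List.pySetD_of_nonneg (h := h0)]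
  apply List.ext_getElem
  · simp
  · intro k hk1 hk2
    simp only [List.getElem_set, List.getElem_map, PySem.List.getElem_pyRange_one]
    split_ifs with h1 h2 h2 <;> first | rfl | omega

theorem pvMat_get {α : Type} (b : Int) (F : Int → Int → α) (i : Int)
    (h0 : 0 ≤ i) (hb : i < b) :
    PySem.List.pyGetD (pvMat b F) i [] = (PySem.List.pyRange 0 b 1).map (fun j => F i j) := by
  unfold pvMat; exact pvGet_map b _ i [] h0 hb

theorem pvMat_upd {α : Type} (b : Int) (F : Int → Int → α) (i0 j0 : Int) (v : α)
    (hi0 : 0 ≤ i0) (hib : i0 < b) (hj0 : 0 ≤ j0) (hjb : j0 < b) :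
    PySem.List.pySetD (pvMat b F) i0
        (PySem.List.pySetD (PySem.List.pyGetD (pvMat b F) i0 []) j0 v)
      = pvMat b (fun i j => if i = i0 ∧ j = j0 then v else F i j) := by
  rw [pvMat_get b F i0 hi0 hib, pvSet_map b _ j0 v hj0 hjb]
  unfold pvMat
  rw [pvSet_map b _ i0 _ hi0 hib]
  apply pvMap_ext
  intro i _ _
  by_cases hi : i = i0
  · subst hi
    simp only [if_pos rfl]
    apply pvMap_ext
    intro j _ _
    by_cases hj : j = j0 <;> simp [hj]
  · simp only [if_neg hi]
    apply pvMap_ext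
    intro j _ _
    simp [hi]

-- fold of in-place updates over a contiguous index interval of a map-normal list
theorem pvIntMap {α : Type} (b : Int) (R : α → α) (d : α) :
    ∀ (m : Nat) (a : Int) (f : Int → α), 0 ≤ a → a + ↑m ≤ b →
    (PySem.List.pyRange a (a + ↑m) 1).foldl
        (fun l i => PySem.List.pySetD l i (R (PySem.List.pyGetD l i d)))
        ((PySem.List.pyRange 0 b 1).map f)
      = (PySem.List.pyRange 0 b 1).map (fun i => if a ≤ i ∧ i < a + ↑m then R (f i) else f i) := by
  intro m
  induction m with
  | zero =>
    intro a f _ _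
    simp only [Nat.cast_zero, add_zero]
    rw [PySem.List.pyRange_one_eq_nil (le_refl a)]
    simp only [List.foldl_nil]
    apply pvMap_ext
    intro i _ _
    rw [if_neg (by omega)]
  | succ m ih =>
    intro a f ha hab
    have hcast : (↑(m + 1) : Int) = ↑m + 1 := by push_cast; ring
    rw [hcast, ← add_assoc, PySem.List.pyRange_one_succ_right (by omega)]
    rw [List.foldl_append, ih a f ha (by omega)]
    simp only [List.foldl_cons, List.foldl_nil]
    rw [pvGet_map b _ (a + ↑m) d (by omega) (by omega)]
    simp only [lt_self_iff_false, and_false, if_false]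
    rw [pvSet_map b _ (a + ↑m) _ (by omega) (by omega)]
    apply pvMap_ext
    intro i _ _
    by_cases h1 : i = a + ↑m
    · subst h1
      rw [if_pos rfl, if_pos (by omega)]
    · rw [if_neg h1]
      split_ifs with h2 h3 <;> first | rfl | omega

theorem pvIntConst {α : Type} (b : Int) (v d : α) (m : Nat) (a : Int) (f : Int → α)
    (h0 : 0 ≤ a) (hb : a + ↑m ≤ b) :
    (PySem.List.pyRange a (a + ↑m) 1).foldl (fun l i => PySem.List.pySetD l i v)
        ((PySem.List.pyRange 0 b 1).map f)
      = (PySem.List.pyRange 0 b 1).map (fun i => if a ≤ i ∧ i < a + ↑m then v else f i) :=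
  pvIntMap b (fun _ => v) d m a f h0 hb

theorem pvQ_nonneg (c t : Int) (hc : 0 < c) (ht : 0 ≤ t) : 0 ≤ PySem.Int.floordiv t c :=
  (PySem.Int.le_floordiv_iff_mul_le hc).mpr (by omega)

theorem pvQ_lt (c g w t : Int) (hc : 0 < c) (hw : w = c * g) (ht : t < w) :
    PySem.Int.floordiv t c < g :=
  (PySem.Int.floordiv_lt_iff_lt_mul hc).mpr (by rw [mul_comm g c, ← hw]; omega)

-- painting one cell on a map-normal pixel grid
theorem pvPaint (g c w : Int) (hc : 0 < c) (hw : w = c * g)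
    (x y : Int) (hx0 : 0 ≤ x) (hxg : x < g) (hy0 : 0 ≤ y) (hyg : y < g)
    (Fm : Int → Int → (Int × Int × Int × Int)) (v : Int × Int × Int × Int) :
    pvA_paintCell (pvMat w Fm) x y c v
      = pvMat w (fun yy xx =>
          if PySem.Int.floordiv yy c = y ∧ PySem.Int.floordiv xx c = x then v
          else Fm yy xx) := by
  have hcnat : ((c.toNat : Int)) = c := Int.toNat_of_nonneg (le_of_lt hc)
  have hyw : y * c + (c.toNat : Int) ≤ w := by
    rw [hcnat, hw, mul_comm c g]
    have : (y + 1) * c ≤ g * c := mul_le_mul_of_nonneg_right (by omega) (le_of_lt hc)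
    nlinarith
  have hxw : x * c + (c.toNat : Int) ≤ w := by
    rw [hcnat, hw, mul_comm c g]
    have : (x + 1) * c ≤ g * c := mul_le_mul_of_nonneg_right (by omega) (le_of_lt hc)
    nlinarith
  have hy1 : (y + 1) * c = y * c + (c.toNat : Int) := by rw [hcnat]; ring
  have hx1 : (x + 1) * c = x * c + (c.toNat : Int) := by rw [hcnat]; ring
  unfold pvA_paintCell pvMat
  rw [hy1, hx1]
  calc
    (PySem.List.pyRange (y * c) (y * c + (c.toNat : Int)) 1).foldl
        (fun px yy =>
          PySem.List.pySetD px yy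
            ((PySem.List.pyRange (x * c) (x * c + (c.toNat : Int)) 1).foldl
              (fun row xx => PySem.List.pySetD row xx v)
              (PySem.List.pyGetD px yy [])))
        ((PySem.List.pyRange 0 w 1).map (fun i => (PySem.List.pyRange 0 w 1).map (fun j => Fm i j)))
      = (PySem.List.pyRange 0 w 1).map (fun yy =>
          if y * c ≤ yy ∧ yy < y * c + (c.toNat : Int) then
            (PySem.List.pyRange (x * c) (x * c + (c.toNat : Int)) 1).foldl
              (fun row xx => PySem.List.pySetD row xx v)
              ((PySem.List.pyRange 0 w 1).map (fun j => Fm yy j))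
          else (PySem.List.pyRange 0 w 1).map (fun j => Fm yy j)) :=
        pvIntMap w
          (fun ρ => (PySem.List.pyRange (x * c) (x * c + (c.toNat : Int)) 1).foldl
            (fun row xx => PySem.List.pySetD row xx v) ρ)
          [] c.toNat (y * c) _ (mul_nonneg hy0 (le_of_lt hc)) hyw
    _ = (PySem.List.pyRange 0 w 1).map (fun yy => (PySem.List.pyRange 0 w 1).map (fun xx =>
          if PySem.Int.floordiv yy c = y ∧ PySem.Int.floordiv xx c = x then v
          else Fm yy xx)) := by
        apply pvMap_ext
        intro yy hyy0 hyyw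
        have hyiff : (y * c ≤ yy ∧ yy < y * c + (c.toNat : Int)) ↔ PySem.Int.floordiv yy c = y := by
          rw [hcnat, PySem.Int.floordiv_eq_iff_of_pos hc]
          constructor <;> (intro h; constructor <;> nlinarith [h.1, h.2])
        by_cases hycond : PySem.Int.floordiv yy c = y
        · rw [if_pos (hyiff.mpr hycond)]
          rw [pvIntConst w v v c.toNat (x * c) _ (mul_nonneg hx0 (le_of_lt hc)) hxw]
          apply pvMap_ext
          intro xx hxx0 hxxw
          have hxiff : (x * c ≤ xx ∧ xx < x * c + (c.toNat : Int)) ↔ PySem.Int.floordiv xx c = x := by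
            rw [hcnat, PySem.Int.floordiv_eq_iff_of_pos hc]
            constructor <;> (intro h; constructor <;> nlinarith [h.1, h.2])
          by_cases hxcond : PySem.Int.floordiv xx c = x
          · rw [if_pos (hxiff.mpr hxcond), if_pos ⟨hycond, hxcond⟩]
          · rw [if_neg (fun h => hxcond (hxiff.mp h)), if_neg (fun h => hxcond h.2)]
        · rw [if_neg (fun h => hycond (hyiff.mp h))]
          apply pvMap_ext
          intro xx _ _
          rw [if_neg (fun h => hycond h.1)]

theorem pvPrimInner (bits : List Int) (occl : List (List Int)) (g c w : Int)
    (hc : 0 < c) (hw : w = c * g)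
    (hoccl : ∀ x y, 0 ≤ x → x < g → 0 ≤ y → y < g →
        PySem.List.pyGetD (PySem.List.pyGetD occl x []) y 0 = pvB_cellBit bits g x y)
    (pr : Int × Int × Int × Int) (y0 : Int) (hy00 : 0 ≤ y0) (hy0g : y0 < g) :
    ∀ (m : Nat), (↑m : Int) ≤ g → ∀ (Fm : Int → Int → (Int × Int × Int × Int)),
    (PySem.List.pyRange 0 (↑m) 1).foldl
      (fun px x => if PySem.List.pyGetD (PySem.List.pyGetD occl x []) y0 0 ≠ 0
                   then pvA_paintCell px x y0 c pr else px)
      (pvMat w Fm)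
    = pvMat w (fun yy xx =>
        if PySem.Int.floordiv yy c = y0 ∧ PySem.Int.floordiv xx c < (↑m : Int)
           ∧ pvB_cellBit bits g (PySem.Int.floordiv xx c) y0 ≠ 0
        then pr else Fm yy xx) := by
  intro m
  induction m with
  | zero =>
    intro _ Fm
    rw [PySem.List.pyRange_one_eq_nil (by omega)]
    simp only [List.foldl_nil]
    apply pvMat_ext
    intro yy xx hyy0 hyyw hxx0 hxxw
    rw [if_neg]
    rintro ⟨-, hlt, -⟩
    have := pvQ_nonneg c xx hc hxx0
    omega
  | succ m ih =>
    intro hm Fm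
    have hcast : ((m + 1 : Nat) : Int) = (m : Int) + 1 := by push_cast; ring
    rw [hcast, PySem.List.pyRange_one_succ_right (by omega), List.foldl_append,
      ih (by omega) Fm]
    simp only [List.foldl_cons, List.foldl_nil]
    rw [hoccl (↑m) y0 (by omega) (by omega) hy00 hy0g]
    by_cases hbit : pvB_cellBit bits g (↑m) y0 ≠ 0
    · rw [if_pos hbit, pvPaint g c w hc hw (↑m) y0 (by omega) (by omega) hy00 hy0g]
      apply pvMat_ext
      intro yy xx hyy0 hyyw hxx0 hxxw
      have hq0 := pvQ_nonneg c xx hc hxx0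
      by_cases hqm : PySem.Int.floordiv xx c = (↑m : Int)
      · rw [hqm]
        by_cases hyc : PySem.Int.floordiv yy c = y0 <;>
          simp [hyc, hbit, lt_add_one] <;> try (split_ifs <;> first | rfl | omega)
      · by_cases hyc : PySem.Int.floordiv yy c = y0 <;>
          by_cases hcq : pvB_cellBit bits g (PySem.Int.floordiv xx c) y0 ≠ 0 <;>
            simp [hyc, hqm, hcq] <;> try (split_ifs <;> first | rfl | omega)
    · rw [if_neg hbit]
      apply pvMat_ext
      intro yy xx hyy0 hyyw hxx0 hxxw
      have hq0 := pvQ_nonneg c xx hc hxx0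
      by_cases hqm : PySem.Int.floordiv xx c = (↑m : Int)
      · rw [hqm]
        by_cases hyc : PySem.Int.floordiv yy c = y0 <;>
          simp [hyc, hbit] <;> try (split_ifs <;> first | rfl | omega)
      · by_cases hyc : PySem.Int.floordiv yy c = y0 <;>
          by_cases hcq : pvB_cellBit bits g (PySem.Int.floordiv xx c) y0 ≠ 0 <;>
            simp [hyc, hqm, hcq] <;> try (split_ifs <;> first | rfl | omega)

theorem pvPrimOuter (bits : List Int) (occl : List (List Int)) (g c w : Int)
    (hc : 0 < c) (hw : w = c * g) (hg : 0 < g)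
    (hoccl : ∀ x y, 0 ≤ x → x < g → 0 ≤ y → y < g →
        PySem.List.pyGetD (PySem.List.pyGetD occl x []) y 0 = pvB_cellBit bits g x y)
    (pr : Int × Int × Int × Int) :
    ∀ (n : Nat), (↑n : Int) ≤ g → ∀ (Fm : Int → Int → (Int × Int × Int × Int)),
    (PySem.List.pyRange 0 (↑n) 1).foldl
      (fun px y => (PySem.List.pyRange 0 g 1).foldl
        (fun px x => if PySem.List.pyGetD (PySem.List.pyGetD occl x []) y 0 ≠ 0
                     then pvA_paintCell px x y c pr else px) px)
      (pvMat w Fm)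
    = pvMat w (fun yy xx =>
        if PySem.Int.floordiv yy c < (↑n : Int)
           ∧ pvB_cellBit bits g (PySem.Int.floordiv xx c) (PySem.Int.floordiv yy c) ≠ 0
        then pr else Fm yy xx) := by
  intro n
  induction n with
  | zero =>
    intro _ Fm
    rw [show PySem.List.pyRange 0 (((0:Nat) : Int)) 1 = [] from
      PySem.List.pyRange_one_eq_nil (by omega)]
    simp only [List.foldl_nil]
    apply pvMat_ext
    intro yy xx hyy0 hyyw hxx0 hxxw
    rw [if_neg]
    rintro ⟨hlt, -⟩
    have := pvQ_nonneg c yy hc hyy0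
    omega
  | succ n ih =>
    intro hn Fm
    have hcast : ((n + 1 : Nat) : Int) = (n : Int) + 1 := by push_cast; ring
    rw [show PySem.List.pyRange 0 (((n+1:Nat)) : Int) 1
        = PySem.List.pyRange 0 ((n:Int)) 1 ++ [((n:Int))] by
      rw [hcast]; exact PySem.List.pyRange_one_succ_right (by omega)]
    rw [List.foldl_append, ih (by omega) Fm]
    simp only [List.foldl_cons, List.foldl_nil]
    have hgnat : ((g.toNat : Nat) : Int) = g := Int.toNat_of_nonneg (by omega)
    rw [show (PySem.List.pyRange 0 g 1) = (PySem.List.pyRange 0 (↑g.toNat) 1) by rw [hgnat]]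
    have hprim := pvPrimInner bits occl g c w hc hw hoccl pr (↑n) (by omega) (by omega)
      g.toNat (le_of_eq hgnat)
    rw [hprim]
    apply pvMat_ext
    intro yy xx hyy0 hyyw hxx0 hxxw
    have hq0 := pvQ_nonneg c xx hc hxx0
    have he0 := pvQ_nonneg c yy hc hyy0
    have hqg := pvQ_lt c g w xx hc hw hxxw
    by_cases hem : PySem.Int.floordiv yy c = (↑n : Int)
    · rw [hem]
      by_cases hcq : pvB_cellBit bits g (PySem.Int.floordiv xx c) (↑n : Int) ≠ 0 <;>
        simp [hcq, hqg, hgnat, lt_add_one] <;> try (split_ifs <;> first | rfl | omega)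
    · by_cases hcq : pvB_cellBit bits g (PySem.Int.floordiv xx c) (PySem.Int.floordiv yy c) ≠ 0 <;>
        simp [hem, hcq, hqg, hgnat] <;> try (split_ifs <;> first | rfl | omega)

theorem pvAccCol (g c w : Int) (hc : 0 < c) (hw : w = c * g)
    (mid : Int) (hm0 : 0 ≤ mid) (hmg : mid < g) (ac : Int × Int × Int × Int) :
    ∀ (n : Nat), (↑n : Int) ≤ g → ∀ (Fm : Int → Int → (Int × Int × Int × Int)),
    (PySem.List.pyRange 0 (↑n) 1).foldl (fun px y => pvA_paintCell px mid y c ac) (pvMat w Fm)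
    = pvMat w (fun yy xx =>
        if PySem.Int.floordiv xx c = mid ∧ PySem.Int.floordiv yy c < (↑n : Int)
        then ac else Fm yy xx) := by
  intro n
  induction n with
  | zero =>
    intro _ Fm
    rw [PySem.List.pyRange_one_eq_nil (by omega)]
    simp only [List.foldl_nil]
    apply pvMat_ext
    intro yy xx hyy0 hyyw hxx0 hxxw
    rw [if_neg]
    rintro ⟨-, hlt⟩
    have := pvQ_nonneg c yy hc hyy0
    omega
  | succ n ih =>
    intro hn Fm
    have hcast : ((n + 1 : Nat) : Int) = (n : Int) + 1 := by push_cast; ring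
    rw [hcast, PySem.List.pyRange_one_succ_right (by omega), List.foldl_append,
      ih (by omega) Fm]
    simp only [List.foldl_cons, List.foldl_nil]
    rw [pvPaint g c w hc hw mid (↑n) hm0 hmg (by omega) (by omega)]
    apply pvMat_ext
    intro yy xx hyy0 hyyw hxx0 hxxw
    have he0 := pvQ_nonneg c yy hc hyy0
    split_ifs with h1 h2 h2 <;> first | rfl | omega

theorem pvAccRow (g c w : Int) (hc : 0 < c) (hw : w = c * g)
    (mid : Int) (hm0 : 0 ≤ mid) (hmg : mid < g) (ac : Int × Int × Int × Int) :
    ∀ (n : Nat), (↑n : Int) ≤ g → ∀ (Fm : Int → Int → (Int × Int × Int × Int)),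
    (PySem.List.pyRange 0 (↑n) 1).foldl (fun px x => pvA_paintCell px x mid c ac) (pvMat w Fm)
    = pvMat w (fun yy xx =>
        if PySem.Int.floordiv yy c = mid ∧ PySem.Int.floordiv xx c < (↑n : Int)
        then ac else Fm yy xx) := by
  intro n
  induction n with
  | zero =>
    intro _ Fm
    rw [PySem.List.pyRange_one_eq_nil (by omega)]
    simp only [List.foldl_nil]
    apply pvMat_ext
    intro yy xx hyy0 hyyw hxx0 hxxw
    rw [if_neg]
    rintro ⟨-, hlt⟩
    have := pvQ_nonneg c xx hc hxx0
    omega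
  | succ n ih =>
    intro hn Fm
    have hcast : ((n + 1 : Nat) : Int) = (n : Int) + 1 := by push_cast; ring
    rw [hcast, PySem.List.pyRange_one_succ_right (by omega), List.foldl_append,
      ih (by omega) Fm]
    simp only [List.foldl_cons, List.foldl_nil]
    rw [pvPaint g c w hc hw (↑n) mid (by omega) (by omega) hm0 hmg]
    apply pvMat_ext
    intro yy xx hyy0 hyyw hxx0 hxxw
    have hq0 := pvQ_nonneg c xx hc hxx0
    split_ifs with h1 h2 h2 <;> first | rfl | omega

theorem pvLeftInner (bits : List Int) :
    ∀ (n : Nat) (r : List Int) (i : Int),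
    (PySem.List.pyRange 0 (↑n) 1).foldl
        (fun (a : List Int × Int) _ =>
          (a.1 ++ [PySem.List.pyGetD bits (PySem.Int.mod a.2 (bits.length : Int)) 0], a.2 + 1))
        (r, i)
      = (r ++ (PySem.List.pyRange 0 (↑n) 1).map (fun k => pvBitAt bits (i + k)), i + ↑n) := by
  intro n
  induction n with
  | zero =>
    intro r i
    rw [show PySem.List.pyRange 0 (((0:Nat)) : Int) 1 = [] from
      PySem.List.pyRange_one_eq_nil (by omega)]
    simp
  | succ n ih =>
    intro r i
    rw [show PySem.List.pyRange 0 (((n+1:Nat)) : Int) 1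
        = PySem.List.pyRange 0 ((n:Int)) 1 ++ [((n:Int))] by
      rw [show (((n+1:Nat)) : Int) = ((n:Int)) + 1 by push_cast; ring]
      exact PySem.List.pyRange_one_succ_right (by omega)]
    rw [List.foldl_append, ih r i]
    simp only [List.foldl_cons, List.foldl_nil, List.map_append, List.map_cons, List.map_nil]
    rw [List.append_assoc]
    congr 1
    push_cast
    ring

theorem pvLeftOuter (bits : List Int) (g : Int) (hg : 0 ≤ g) :
    ∀ (n : Nat) (rows : List (List Int)) (i : Int),
    (PySem.List.pyRange 0 (↑n) 1).foldl
        (fun (acc : List (List Int) × Int) _ =>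
          (acc.1 ++ [((PySem.List.pyRange 0 g 1).foldl
              (fun (a : List Int × Int) _ =>
                (a.1 ++ [PySem.List.pyGetD bits (PySem.Int.mod a.2 (bits.length : Int)) 0], a.2 + 1))
              (([] : List Int), acc.2)).1],
           ((PySem.List.pyRange 0 g 1).foldl
              (fun (a : List Int × Int) _ =>
                (a.1 ++ [PySem.List.pyGetD bits (PySem.Int.mod a.2 (bits.length : Int)) 0], a.2 + 1))
              (([] : List Int), acc.2)).2))
        (rows, i)
      = (rows ++ (PySem.List.pyRange 0 (↑n) 1).map (fun x =>
          (PySem.List.pyRange 0 g 1).map (fun y => pvBitAt bits (i + x * g + y))),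
         i + ↑n * g) := by
  intro n
  induction n with
  | zero =>
    intro rows i
    rw [show PySem.List.pyRange 0 (((0:Nat)) : Int) 1 = [] from
      PySem.List.pyRange_one_eq_nil (by omega)]
    simp
  | succ n ih =>
    intro rows i
    rw [show PySem.List.pyRange 0 (((n+1:Nat)) : Int) 1
        = PySem.List.pyRange 0 ((n:Int)) 1 ++ [((n:Int))] by
      rw [show (((n+1:Nat)) : Int) = ((n:Int)) + 1 by push_cast; ring]
      exact PySem.List.pyRange_one_succ_right (by omega)]
    rw [List.foldl_append, ih rows i]
    simp only [List.foldl_cons, List.foldl_nil, List.map_append, List.map_cons, List.map_nil]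
    have hgn : g = ((g.toNat : Nat) : Int) := (Int.toNat_of_nonneg hg).symm
    rw [show (PySem.List.pyRange 0 g 1).foldl
        (fun (a : List Int × Int) _ =>
          (a.1 ++ [PySem.List.pyGetD bits (PySem.Int.mod a.2 (bits.length : Int)) 0], a.2 + 1))
        (([] : List Int), i + ↑n * g)
        = ([] ++ (PySem.List.pyRange 0 g 1).map (fun k => pvBitAt bits ((i + ↑n * g) + k)),
           (i + ↑n * g) + g) by
      have hi := pvLeftInner bits g.toNat [] (i + ↑n * g)
      rw [Int.toNat_of_nonneg hg] at hi
      exact hi]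
    simp only [List.nil_append]
    rw [List.append_assoc]
    congr 1
    push_cast
    ring

theorem pvExpandSeg {α : Type} (c : Int) (hc : 0 < c) :
    ∀ (n : Nat) (h : Int → α),
    (PySem.List.pyRange 0 (↑n) 1).flatMap (fun k => PySem.List.pyRepeat [h k] c)
      = (PySem.List.pyRange 0 (c * ↑n) 1).map (fun t => h (PySem.Int.floordiv t c)) := by
  intro n
  induction n with
  | zero =>
    intro h
    rw [show PySem.List.pyRange 0 (((0:Nat)) : Int) 1 = [] from
      PySem.List.pyRange_one_eq_nil (by omega)]
    rw [show PySem.List.pyRange 0 (c * ((0:Nat) : Int)) 1 = [] from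
      PySem.List.pyRange_one_eq_nil (by omega)]
    simp
  | succ n ih =>
    intro h
    rw [show PySem.List.pyRange 0 (((n+1:Nat)) : Int) 1
        = PySem.List.pyRange 0 ((n:Int)) 1 ++ [((n:Int))] by
      rw [show (((n+1:Nat)) : Int) = ((n:Int)) + 1 by push_cast; ring]
      exact PySem.List.pyRange_one_succ_right (by omega)]
    rw [List.flatMap_append, ih h]
    rw [show PySem.List.pyRange 0 (c * ((n+1:Nat) : Int)) 1
        = PySem.List.pyRange 0 (c * (n:Int)) 1 ++ PySem.List.pyRange (c * (n:Int)) (c * ((n+1:Nat) : Int)) 1 from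
      PySem.List.pyRange_one_append 0 (c * (n:Int)) (c * ((n+1:Nat) : Int))
        (by positivity) (by push_cast; nlinarith)]
    rw [List.map_append]
    have hconst : (PySem.List.pyRange (c * (n:Int)) (c * ((n+1:Nat) : Int)) 1).map
        (fun t => h (PySem.Int.floordiv t c))
        = (PySem.List.pyRange (c * (n:Int)) (c * ((n+1:Nat) : Int)) 1).map (fun _ => h (n:Int)) := by
      apply List.map_congr_left
      intro t ht
      rw [PySem.List.mem_pyRange_one] at ht
      congr 1
      rw [PySem.Int.floordiv_eq_iff_of_pos hc]
      constructor
      · nlinarith [ht.1]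
      · push_cast at ht ⊢; nlinarith [ht.2]
    refine congrArg₂ (· ++ ·) rfl ?_
    simp only [List.flatMap_cons, List.flatMap_nil, List.append_nil]
    rw [PySem.List.pyRepeat_singleton, hconst, List.map_const', PySem.List.length_pyRange_one]
    have hd : c * (((n+1:Nat)) : Int) - c * ((n:Int)) = c := by push_cast; ring
    rw [hd]

theorem pvOccInner (left : List (List Int)) (g x : Int)
    (hx0 : 0 ≤ x) (hxg : x < g) :
    ∀ (m : Nat), (↑m : Int) ≤ g → ∀ (F : Int → Int → Int),
    (PySem.List.pyRange 0 (↑m) 1).foldl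
      (fun occ y =>
        PySem.List.pySetD
          (PySem.List.pySetD occ x
            (PySem.List.pySetD (PySem.List.pyGetD occ x [])
              y (PySem.List.pyGetD (PySem.List.pyGetD left x []) y 0)))
          (g - 1 - x)
          (PySem.List.pySetD
            (PySem.List.pyGetD
              (PySem.List.pySetD occ x
                (PySem.List.pySetD (PySem.List.pyGetD occ x [])
                  y (PySem.List.pyGetD (PySem.List.pyGetD left x []) y 0)))
              (g - 1 - x) [])
            y (PySem.List.pyGetD (PySem.List.pyGetD left x []) y 0)))
      (pvMat g F)
    = pvMat g (fun i j =>
        if (i = x ∨ i = g - 1 - x) ∧ 0 ≤ j ∧ j < (↑m : Int)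
        then PySem.List.pyGetD (PySem.List.pyGetD left x []) j 0
        else F i j) := by
  intro m
  induction m with
  | zero =>
    intro _ F
    rw [show PySem.List.pyRange 0 (((0:Nat)) : Int) 1 = [] from
      PySem.List.pyRange_one_eq_nil (by omega)]
    simp only [List.foldl_nil]
    apply pvMat_ext
    intro i j _ _ _ _
    rw [if_neg]
    rintro ⟨-, h1, h2⟩
    omega
  | succ m ih =>
    intro hm F
    rw [show PySem.List.pyRange 0 (((m+1:Nat)) : Int) 1
        = PySem.List.pyRange 0 ((m:Int)) 1 ++ [((m:Int))] by
      rw [show (((m+1:Nat)) : Int) = ((m:Int)) + 1 by push_cast; ring]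
      exact PySem.List.pyRange_one_succ_right (by omega)]
    rw [List.foldl_append, ih (by omega) F]
    simp only [List.foldl_cons, List.foldl_nil]
    rw [pvMat_upd g _ x (↑m) _ hx0 hxg (by omega) (by omega)]
    rw [pvMat_upd g _ (g - 1 - x) (↑m) _ (by omega) (by omega) (by omega) (by omega)]
    apply pvMat_ext
    intro i j hi0 hig hj0 hjg
    by_cases hj : j = (↑m : Int)
    · subst hj
      by_cases hi1 : i = x <;> by_cases hi2 : i = g - 1 - x <;>
        simp [hi1, hi2] <;> try (split_ifs <;> first | rfl | omega)
    · by_cases hi1 : i = x <;> by_cases hi2 : i = g - 1 - x <;>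
        simp [hi1, hi2, hj] <;> try (split_ifs <;> first | rfl | omega)

theorem pvOccOuter (bits : List Int) (left : List (List Int)) (g cl : Int)
    (hg : 0 < g) (hclb : 2 * cl ≤ g + 1 ∧ g ≤ 2 * cl)
    (hleft : ∀ x y, 0 ≤ x → x < cl → 0 ≤ y → y < g →
        PySem.List.pyGetD (PySem.List.pyGetD left x []) y 0 = pvBitAt bits (x * g + y)) :
    ∀ (n : Nat), (↑n : Int) ≤ cl → ∀ (F : Int → Int → Int),
    (PySem.List.pyRange 0 (↑n) 1).foldl
      (fun occ x =>
        (PySem.List.pyRange 0 g 1).foldl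
          (fun occ y =>
            PySem.List.pySetD
              (PySem.List.pySetD occ x
                (PySem.List.pySetD (PySem.List.pyGetD occ x [])
                  y (PySem.List.pyGetD (PySem.List.pyGetD left x []) y 0)))
              (g - 1 - x)
              (PySem.List.pySetD
                (PySem.List.pyGetD
                  (PySem.List.pySetD occ x
                    (PySem.List.pySetD (PySem.List.pyGetD occ x [])
                      y (PySem.List.pyGetD (PySem.List.pyGetD left x []) y 0)))
                  (g - 1 - x) [])
                y (PySem.List.pyGetD (PySem.List.pyGetD left x []) y 0)))
          occ)
      (pvMat g F)
    = pvMat g (fun i j =>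
        if (i < (↑n : Int) ∨ g - 1 - i < (↑n : Int)) ∧ 0 ≤ j ∧ j < g
        then pvBitAt bits (pvColOf g i * g + j)
        else F i j) := by
  intro n
  induction n with
  | zero =>
    intro _ F
    rw [show PySem.List.pyRange 0 (((0:Nat)) : Int) 1 = [] from
      PySem.List.pyRange_one_eq_nil (by omega)]
    simp only [List.foldl_nil]
    apply pvMat_ext
    intro i j hi0 hig _ _
    rw [if_neg]
    rintro ⟨h1, -⟩
    omega
  | succ n ih =>
    intro hn F
    rw [show PySem.List.pyRange 0 (((n+1:Nat)) : Int) 1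
        = PySem.List.pyRange 0 ((n:Int)) 1 ++ [((n:Int))] by
      rw [show (((n+1:Nat)) : Int) = ((n:Int)) + 1 by push_cast; ring]
      exact PySem.List.pyRange_one_succ_right (by omega)]
    rw [List.foldl_append, ih (by omega) F]
    simp only [List.foldl_cons, List.foldl_nil]
    have hgnat : ((g.toNat : Nat) : Int) = g := Int.toNat_of_nonneg (by omega)
    have hinner := pvOccInner left g (↑n) (by omega) (by omega) g.toNat (le_of_eq hgnat)
    rw [show (PySem.List.pyRange 0 g 1) = (PySem.List.pyRange 0 ((g.toNat : Nat) : Int) 1) by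
      rw [hgnat]]
    rw [hinner]
    apply pvMat_ext
    intro i j hi0 hig hj0 hjg
    have hcol1 : i = (↑n : Int) → pvColOf g i = (↑n : Int) := by
      intro h; subst h; unfold pvColOf; rw [if_pos (by omega)]
    have hcol2 : i = g - 1 - (↑n : Int) → i ≠ (↑n : Int) → pvColOf g i = (↑n : Int) := by
      intro h hne; subst h; unfold pvColOf; rw [if_neg (by omega)]; omega
    by_cases hi1 : i = (↑n : Int)
    · have hc := hcol1 hi1
      rw [hleft (↑n) j (by omega) (by omega) hj0 hjg]
      simp only [hgnat]
      rw [if_pos ⟨Or.inl hi1, hj0, hjg⟩, if_pos ⟨by omega, hj0, hjg⟩, hc]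
    · by_cases hi2 : i = g - 1 - (↑n : Int)
      · have hc := hcol2 hi2 hi1
        rw [hleft (↑n) j (by omega) (by omega) hj0 hjg]
        simp only [hgnat]
        rw [if_pos ⟨by omega, hj0, hjg⟩, if_pos ⟨by omega, hj0, hjg⟩, hc]
      · simp only [hgnat]
        rw [if_neg (by omega)]
        split_ifs with h1 h2 <;> first | rfl | omega


theorem pvA_left_eq (bits : List Int) (cl g : Int) (hcl : 0 ≤ cl) (hg : 0 ≤ g) :
    (pvA_left bits cl g).1
      = (PySem.List.pyRange 0 cl 1).map (fun x =>
          (PySem.List.pyRange 0 g 1).map (fun y => pvBitAt bits (x * g + y))) := by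
  have h := pvLeftOuter bits g hg cl.toNat [] 0
  rw [Int.toNat_of_nonneg hcl] at h
  have h1 : (pvA_left bits cl g).1
      = [] ++ (PySem.List.pyRange 0 cl 1).map (fun x =>
          (PySem.List.pyRange 0 g 1).map (fun y => pvBitAt bits (0 + x * g + y))) :=
    congrArg Prod.fst h
  rw [h1, List.nil_append]
  apply pvMap_ext
  intro x _ _
  apply pvMap_ext
  intro y _ _
  congr 1
  ring

theorem pvOcc0 (g : Int) :
    (PySem.List.pyRange 0 g 1).map (fun _ => PySem.List.pyRepeat [(0 : Int)] g)
      = pvMat g (fun _ _ => (0 : Int)) := by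
  unfold pvMat
  apply pvMap_ext
  intro i _ _
  rw [PySem.List.pyRepeat_singleton, List.map_const', PySem.List.length_pyRange_one]
  congr 1
  omega

theorem pvA_occ_eq (bits : List Int) (g cl : Int) (hg : 0 < g) (hcl0 : 0 ≤ cl)
    (hclb : 2 * cl ≤ g + 1 ∧ g ≤ 2 * cl) :
    pvA_occ (pvA_left bits cl g).1 cl g
      = pvMat g (fun i j =>
          if (i < cl ∨ g - 1 - i < cl) ∧ 0 ≤ j ∧ j < g
          then pvBitAt bits (pvColOf g i * g + j) else 0) := by
  have hleft : ∀ x y, 0 ≤ x → x < cl → 0 ≤ y → y < g →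
      PySem.List.pyGetD (PySem.List.pyGetD ((pvA_left bits cl g).1) x []) y 0
        = pvBitAt bits (x * g + y) := by
    intro x y hx0 hxc hy0 hyg
    rw [pvA_left_eq bits cl g hcl0 (by omega), pvGet_map cl _ x [] hx0 hxc,
      pvGet_map g _ y 0 hy0 hyg]
  have h := pvOccOuter bits ((pvA_left bits cl g).1) g cl hg hclb hleft cl.toNat
    (le_of_eq (Int.toNat_of_nonneg hcl0)) (fun _ _ => 0)
  rw [Int.toNat_of_nonneg hcl0] at h
  unfold pvA_occ
  rw [pvOcc0 g]
  exact h

theorem pvSum_eq (bits : List Int) (g cl : Int) (hg : 0 < g)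
    (hclb : 2 * cl ≤ g + 1 ∧ g ≤ 2 * cl) :
    ((pvMat g (fun i j =>
        if (i < cl ∨ g - 1 - i < cl) ∧ 0 ≤ j ∧ j < g
        then pvBitAt bits (pvColOf g i * g + j) else 0)).map List.sum).sum
      = (PySem.List.pyRange 0 g 1).foldl
          (fun s x => (PySem.List.pyRange 0 g 1).foldl
            (fun s y => s + pvB_cellBit bits g x y) s) 0 := by
  have hinner : ∀ (x s : Int),
      (PySem.List.pyRange 0 g 1).foldl (fun s y => s + pvB_cellBit bits g x y) s
        = s + ((PySem.List.pyRange 0 g 1).map (fun y => pvB_cellBit bits g x y)).sum :=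
    fun x s => PySem.List.foldl_add (PySem.List.pyRange 0 g 1) (fun y => pvB_cellBit bits g x y) s
  simp only [hinner]
  rw [PySem.List.foldl_add, zero_add]
  unfold pvMat
  rw [List.map_map]
  congr 1
  apply pvMap_ext
  intro i hi0 hig
  simp only [Function.comp]
  congr 1
  apply pvMap_ext
  intro j hj0 hjg
  rw [if_pos ⟨by omega, hj0, hjg⟩, pvCellBit_eq]

-- B's output: one colour per cell, upscaled by list repetition, as a map-normal grid
theorem pvB_grid_eq (bits : List Int) (g mid c : Int) (ua : Bool)
    (pr4 bg4 ac4 : Int × Int × Int × Int) (hg : 0 < g) (hc : 0 < c) :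
    (PySem.List.pyRange 0 g 1).foldl
      (fun px y => px ++ PySem.List.pyRepeat
        [(PySem.List.pyRange 0 g 1).foldl
          (fun r x => r ++ PySem.List.pyRepeat [pvB_color bits g mid ua pr4 bg4 ac4 x y] c) []] c)
      []
    = pvMat (c * g) (fun yy xx =>
        pvB_color bits g mid ua pr4 bg4 ac4
          (PySem.Int.floordiv xx c) (PySem.Int.floordiv yy c)) := by
  rw [PySem.List.foldl_append_eq_flatMap, List.nil_append]
  have hgnat : ((g.toNat : Nat) : Int) = g := Int.toNat_of_nonneg (by omega)
  have hrow : ∀ y : Int,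
      (PySem.List.pyRange 0 g 1).foldl
        (fun r x => r ++ PySem.List.pyRepeat [pvB_color bits g mid ua pr4 bg4 ac4 x y] c) []
      = (PySem.List.pyRange 0 (c * g) 1).map
          (fun xx => pvB_color bits g mid ua pr4 bg4 ac4 (PySem.Int.floordiv xx c) y) := by
    intro y
    rw [PySem.List.foldl_append_eq_flatMap, List.nil_append]
    have h := pvExpandSeg c hc g.toNat (fun x => pvB_color bits g mid ua pr4 bg4 ac4 x y)
    rw [hgnat] at h
    exact h
  have e1 : (PySem.List.pyRange 0 g 1).flatMap
      (fun y => PySem.List.pyRepeat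
        [(PySem.List.pyRange 0 g 1).foldl
          (fun r x => r ++ PySem.List.pyRepeat [pvB_color bits g mid ua pr4 bg4 ac4 x y] c) []] c)
      = (PySem.List.pyRange 0 g 1).flatMap
        (fun y => PySem.List.pyRepeat
          [(PySem.List.pyRange 0 (c * g) 1).map
            (fun xx => pvB_color bits g mid ua pr4 bg4 ac4 (PySem.Int.floordiv xx c) y)] c) :=
    congrArg (fun f => List.flatMap f (PySem.List.pyRange 0 g 1))
      (funext (fun y => congrArg (fun r => PySem.List.pyRepeat [r] c) (hrow y)))
  have h2 := pvExpandSeg c hc g.toNat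
    (fun y => (PySem.List.pyRange 0 (c * g) 1).map
      (fun xx => pvB_color bits g mid ua pr4 bg4 ac4 (PySem.Int.floordiv xx c) y))
  rw [hgnat] at h2
  exact e1.trans (h2.trans rfl)

-- ===== VERDICT (by name: the statement is the Claim_ definition above) =====
theorem render_identicon_png_spec : Claim_equal_render_identicon_png := by
  intro hexhash size_px grid primary_rgb bg_rgb accent_rgb _hdom _hpre
  unfold Spec_render_identicon_png
  cases hhex : pvHexBytes? hexhash with
  | none => simp only [render_identicon_png, render_identicon_png_alt, hhex]
  | some data =>
    simp only [render_identicon_png, render_identicon_png_alt, hhex]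
    set bits := pvBitsOf data with hbits
    set cc := max 1 (PySem.Int.floordiv size_px grid) with hcc
    set clv := PySem.Int.floordiv (grid + 1) 2 with hclv
    set midv := PySem.Int.floordiv grid 2 with hmidv
    set pr4 := (primary_rgb.1, primary_rgb.2.1, primary_rgb.2.2, (255 : Int)) with hpr4
    set bg4 := (bg_rgb.1, bg_rgb.2.1, bg_rgb.2.2, (255 : Int)) with hbg4
    set ac4 := ((accent_rgb.getD (0, 0, 0)).1, (accent_rgb.getD (0, 0, 0)).2.1,
      (accent_rgb.getD (0, 0, 0)).2.2, (255 : Int)) with hac4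
    have hcpos : (0 : Int) < cc := by
      rw [hcc]; exact lt_of_lt_of_le one_pos (le_max_left _ _)
    by_cases hgpos : 1 ≤ grid
    · -- grid ≥ 1: both sides are the same cell-colour grid, upscaled
      have hg : (0 : Int) < grid := by omega
      have hgnat : ((grid.toNat : Nat) : Int) = grid := Int.toNat_of_nonneg (by omega)
      have hclb : 2 * clv ≤ grid + 1 ∧ grid ≤ 2 * clv := by
        have h1 := PySem.Int.floordiv_mul_add_mod (grid + 1) 2
        have h2 := PySem.Int.mod_nonneg (grid + 1) (by norm_num : (0 : Int) < 2)
        have h3 := PySem.Int.mod_lt (grid + 1) (by norm_num : (0 : Int) < 2)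
        rw [hclv]
        omega
      have hcl0 : 0 ≤ clv := by omega
      have hmid0 : 0 ≤ midv := by
        rw [hmidv]; exact (PySem.Int.le_floordiv_iff_mul_le (by norm_num)).mpr (by omega)
      have hmidg : midv < grid := by
        rw [hmidv]; exact (PySem.Int.floordiv_lt_iff_lt_mul (by norm_num)).mpr (by omega)
      rw [pvA_occ_eq bits grid clv hg hcl0 hclb, pvSum_eq bits grid clv hg hclb]
      set occm := pvMat grid (fun i j =>
        if (i < clv ∨ grid - 1 - i < clv) ∧ 0 ≤ j ∧ j < grid
        then pvBitAt bits (pvColOf grid i * grid + j) else 0) with hoccm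
      have hoccl : ∀ x y, 0 ≤ x → x < grid → 0 ≤ y → y < grid →
          PySem.List.pyGetD (PySem.List.pyGetD occm x []) y 0 = pvB_cellBit bits grid x y := by
        intro x y hx0 hxg hy0 hyg
        rw [hoccm, pvMat_get grid _ x hx0 hxg, pvGet_map grid _ y 0 hy0 hyg,
          if_pos ⟨by omega, hy0, hyg⟩]
        exact (pvCellBit_eq bits grid x y).symm
      rw [show (PySem.List.pyRange 0 (cc * grid) 1).map
          (fun _ => (PySem.List.pyRange 0 (cc * grid) 1).map (fun _ => bg4))
          = pvMat (cc * grid) (fun _ _ => bg4) from rfl]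
      have hPO := pvPrimOuter bits occm grid cc (cc * grid) hcpos rfl hg hoccl pr4
        grid.toNat (le_of_eq hgnat) (fun _ _ => bg4)
      rw [hgnat] at hPO
      rw [hPO]
      set tot := (PySem.List.pyRange 0 grid 1).foldl
        (fun s x => (PySem.List.pyRange 0 grid 1).foldl
          (fun s y => s + pvB_cellBit bits grid x y) s) 0 with htot
      rcases Bool.eq_false_or_eq_true
          (accent_rgb.isSome && (PySem.Int.mod tot 3 == 1)) with hua | hua <;> rw [hua]
      · -- accent cross painted over
        rw [if_pos rfl]
        have hACc := pvAccCol grid cc (cc * grid) hcpos rfl midv hmid0 hmidg ac4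
          grid.toNat (le_of_eq hgnat)
          (fun yy xx =>
            if PySem.Int.floordiv yy cc < grid ∧
               pvB_cellBit bits grid (PySem.Int.floordiv xx cc) (PySem.Int.floordiv yy cc) ≠ 0
            then pr4 else bg4)
        rw [hgnat] at hACc
        rw [hACc]
        have hACr := pvAccRow grid cc (cc * grid) hcpos rfl midv hmid0 hmidg ac4
          grid.toNat (le_of_eq hgnat)
          (fun yy xx =>
            if PySem.Int.floordiv xx cc = midv ∧ PySem.Int.floordiv yy cc < grid then ac4
            else if PySem.Int.floordiv yy cc < grid ∧
               pvB_cellBit bits grid (PySem.Int.floordiv xx cc) (PySem.Int.floordiv yy cc) ≠ 0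
            then pr4 else bg4)
        rw [hgnat] at hACr
        rw [hACr, pvB_grid_eq bits grid midv cc true pr4 bg4 ac4 hg hcpos]
        apply pvMat_ext
        intro yy xx hyy0 hyyw hxx0 hxxw
        have hqg := pvQ_lt cc grid (cc * grid) xx hcpos rfl hxxw
        have heg := pvQ_lt cc grid (cc * grid) yy hcpos rfl hyyw
        simp only [pvB_color, Bool.true_and, Bool.or_eq_true, beq_iff_eq]
        by_cases hq : PySem.Int.floordiv xx cc = midv <;>
          by_cases he : PySem.Int.floordiv yy cc = midv <;>
            by_cases hcq : pvB_cellBit bits grid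
                (PySem.Int.floordiv xx cc) (PySem.Int.floordiv yy cc) ≠ 0 <;>
              simp [hq, he, hcq, hqg, heg] <;> try (split_ifs <;> first | rfl | omega)
      · -- no accent
        rw [if_neg Bool.false_ne_true,
          pvB_grid_eq bits grid midv cc false pr4 bg4 ac4 hg hcpos]
        apply pvMat_ext
        intro yy xx hyy0 hyyw hxx0 hxxw
        have heg := pvQ_lt cc grid (cc * grid) yy hcpos rfl hyyw
        by_cases hcq : pvB_cellBit bits grid
            (PySem.Int.floordiv xx cc) (PySem.Int.floordiv yy cc) ≠ 0 <;>
          simp [pvB_color, hcq, heg]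
    · -- grid ≤ 0: every loop is empty and the pixel grid itself is empty
      rw [PySem.List.pyRange_one_eq_nil (show grid ≤ 0 by omega)]
      simp only [List.foldl_nil]
      rw [PySem.List.pyRange_one_eq_nil (show cc * grid ≤ 0 from
        mul_nonpos_of_nonneg_of_nonpos (by omega) (by omega))]
      simp only [List.map_nil, ite_self]
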